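-- pv_equiv track=rewrite | github.com/cqkh42/advent-of-code | aoc_cqkh42/year_2019/day_16.py | do_iteration
-- ===== SOURCE A (Python) =====
-- def do_iteration(numbers):
--     sum_ = 0
--     result = []
--     for num in numbers[-1::-1]:
--         sum_ += num
--         result.append(sum_)
--     result = [abs(num) % 10 for num in result]
--     result.reverse()
--     return result
-- ===== SOURCE B (Python) =====
-- def do_iteration(numbers):
--     total = sum(numbers)
--     prefix = 0
--     result = []
--     for num in numbers:
--         result.append(abs(total - prefix) % 10)
--         prefix += num
--     return result
-- ===== Notes on version B (the rewrite author's own statement) =====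
-- stated objective: alternative
-- what changed: Replaced A's reverse-iteration suffix accumulation plus map and reverse with a single forward pass that precomputes the total and derives each suffix sum as total minus a running prefix.
import Mathlib
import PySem

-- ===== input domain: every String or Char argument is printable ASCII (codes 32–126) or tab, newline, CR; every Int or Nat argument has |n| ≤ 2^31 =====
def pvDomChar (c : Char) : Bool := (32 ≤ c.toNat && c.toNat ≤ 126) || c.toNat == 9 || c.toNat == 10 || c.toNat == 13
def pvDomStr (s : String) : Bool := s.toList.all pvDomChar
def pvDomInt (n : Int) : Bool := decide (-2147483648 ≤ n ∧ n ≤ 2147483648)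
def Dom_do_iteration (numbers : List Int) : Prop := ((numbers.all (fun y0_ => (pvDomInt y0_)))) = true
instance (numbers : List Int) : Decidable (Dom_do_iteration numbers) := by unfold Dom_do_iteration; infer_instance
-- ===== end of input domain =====

-- B replaces A's reverse-iteration suffix accumulation (+ map + reverse) with one forward
-- pass deriving each suffix sum as total − running prefix (objective: alternative decomposition).

-- ===== PORT A =====
-- the for-loop over numbers[-1::-1]: sum_ accumulates, each new sum_ is appended to result
def pvALoop : List Int → Int → List Int → List Int
  | [], _, res => res
  | n :: t, s, res => pvALoop t (s + n) (res ++ [s + n])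

def do_iteration (numbers : List Int) : List Int :=
  -- numbers[-1::-1]; step = -1 ≠ 0 so Python's slice always yields a list (getD [] unreachable)
  let rev := (PySem.List.slice? numbers (some (-1)) none (-1)).getD []
  let result := pvALoop rev 0 []
  let result := result.map (fun num => PySem.Int.mod |num| 10)
  result.reverse

-- ===== PORT B =====
def pvBLoop : List Int → Int → Int → List Int
  | [], _, _ => []
  | n :: t, total, prefix_ => PySem.Int.mod |total - prefix_| 10 :: pvBLoop t total (prefix_ + n)

def do_iteration_alt (numbers : List Int) : List Int :=
  pvBLoop numbers numbers.sum 0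

-- ===== PRECONDITION & SPEC =====
def Spec_do_iteration (numbers : List Int) (out : List Int) : Prop := out = do_iteration_alt numbers
instance (numbers : List Int) (out : List Int) : Decidable (Spec_do_iteration numbers out) := by unfold Spec_do_iteration; infer_instance

-- ===== CLAIM (what is proved, stated in full; the proofs are below) =====
def Claim_equal_do_iteration : Prop := ∀ (numbers : List Int), Dom_do_iteration numbers → Spec_do_iteration numbers (do_iteration numbers)

-- ===== LEMMAS AND PROOFS =====

theorem pv_slice_rev (xs : List Int) :
    PySem.List.slice? xs (some (-1)) none (-1) = some xs.reverse := by
  rw [← PySem.List.slice?_none_none_neg_one]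
  simp [PySem.List.slice?, PySem.List.sliceIndices, sub_eq_neg_add]

theorem pvALoop_acc (t : List Int) (s : Int) (res : List Int) :
    pvALoop t s res = res ++ pvALoop t s [] := by
  induction t generalizing s res with
  | nil => simp [pvALoop]
  | cons n t ih =>
      rw [pvALoop, pvALoop, ih, ih (s + n) ([] ++ [s + n])]
      simp

theorem pvALoop_append (l l' : List Int) (s : Int) :
    pvALoop (l ++ l') s [] = pvALoop l s [] ++ pvALoop l' (s + l.sum) [] := by
  induction l generalizing s with
  | nil => simp [pvALoop]
  | cons n t ih =>
      rw [List.cons_append, pvALoop, pvALoop, pvALoop_acc, pvALoop_acc t, ih]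
      simp [add_assoc]

theorem pv_doA_cons (x : Int) (xs : List Int) :
    do_iteration (x :: xs) =
      PySem.Int.mod |xs.sum + x| 10 :: do_iteration xs := by
  simp only [do_iteration, pv_slice_rev, Option.getD_some, List.reverse_cons]
  rw [pvALoop_append]
  simp only [pvALoop, List.nil_append, List.map_append, List.reverse_append,
    List.map_cons, List.map_nil, List.reverse_cons, List.reverse_nil, List.nil_append,
    List.cons_append, List.sum_reverse, zero_add]

theorem pvBLoop_shift (t : List Int) (total p : Int) :
    pvBLoop t total p = pvBLoop t (total - p) 0 := by
  induction t generalizing total p with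
  | nil => simp [pvBLoop]
  | cons n t ih =>
      rw [pvBLoop, pvBLoop, ih total (p + n), ih (total - p) (0 + n)]
      norm_num
      ring_nf

theorem pv_main (numbers : List Int) :
    do_iteration numbers = do_iteration_alt numbers := by
  induction numbers with
  | nil => simp [do_iteration, do_iteration_alt, pvALoop, pvBLoop, pv_slice_rev]
  | cons x xs ih =>
      rw [pv_doA_cons, ih]
      simp only [do_iteration_alt, List.sum_cons, pvBLoop]
      rw [pvBLoop_shift xs (x + xs.sum) (0 + x)]
      norm_num [add_comm]

-- ===== VERDICT (by name: the statement is the Claim_ definition above) =====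
theorem do_iteration_spec : Claim_equal_do_iteration := by
  intro numbers _
  unfold Spec_do_iteration
  exact pv_main numbers
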